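-- pv_equiv track=rewrite | github.com/thlabbe/AOC2023 | day1.py | rech_gauche_droite
-- ===== SOURCE A (Python) =====
-- def rech_gauche_droite(l, dic):
--     res = []
--     keys = dic.keys()
--     for i in range(0, len(l), 1):
--         for k in keys:
--             if l[i:].startswith(k):
--                 res.append({"pos": i, "key": k, "value": dic.get(k)})
--
--     return res[0].get("value")
-- ===== SOURCE B (Python) =====
-- def rech_gauche_droite(l, dic):
--     found = [(l.find(k), v) for k, v in dic.items() if k in l]
--     found.sort(key=lambda t: t[0])
--     return found[0][1]
-- ===== Notes on version B (the rewrite author's own statement) =====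
-- stated objective: simpler
-- what changed: Replaces the explicit scan over every start position (inner startswith test over all keys) by one str.find per key, building (position, value) pairs for keys present in the string and taking min on position, which preserves A's leftmost-position, dict-order tie-break.
import Mathlib
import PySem

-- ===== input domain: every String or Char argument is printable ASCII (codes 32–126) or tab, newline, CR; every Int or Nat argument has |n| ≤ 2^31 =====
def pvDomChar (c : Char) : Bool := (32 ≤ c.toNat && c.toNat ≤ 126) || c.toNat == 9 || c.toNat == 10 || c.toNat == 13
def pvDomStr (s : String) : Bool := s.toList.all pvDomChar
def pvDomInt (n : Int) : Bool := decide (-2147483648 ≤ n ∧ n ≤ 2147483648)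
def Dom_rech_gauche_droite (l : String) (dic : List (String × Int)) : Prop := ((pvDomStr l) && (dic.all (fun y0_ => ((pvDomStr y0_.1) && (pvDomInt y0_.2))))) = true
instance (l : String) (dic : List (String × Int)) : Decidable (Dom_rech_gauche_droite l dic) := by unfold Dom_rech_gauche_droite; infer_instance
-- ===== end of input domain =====

-- B replaces A's scan over every start position by one find per key plus a min on the
-- found positions (objective: simpler; same leftmost-position, dict-order tie-break).

-- ===== PORT A =====
-- A scans positions left to right, for each position all dict keys, collecting every match;
-- it returns the value of the first collected match (res[0] raises IndexError when empty: Pre_).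
def rech_gauche_droite (l : String) (dic : List (String × Int)) : Int :=
  match PySem.List.pyGet?
      ((PySem.List.pyRange 0 (PySem.Str.len l) 1).foldl
        (fun res i => (PySem.Dict.ofList dic).keys.foldl
          (fun res k =>
            if PySem.Str.startswith (PySem.Str.slice l (some i)) k then
              -- dic.get(k): k is drawn from dic's keys, so it is present; the default is never used
              res ++ [(i, k, (PySem.Dict.ofList dic).getD k 0)]
            else res) res) []) 0 with
  | some t => t.2.2
  | none => 0

-- ===== PORT B =====
-- B: one l.find(k) per key present in l, then the first minimum by position.
def rech_gauche_droite_alt (l : String) (dic : List (String × Int)) : Int :=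
  let found := ((PySem.Dict.ofList dic).items.filter (fun p => PySem.Str.isIn p.1 l)).map
    (fun p => (PySem.Str.find l p.1, p.2))
  match PySem.List.min? found (fun t => t.1) with
  | some t => t.2
  | none => 0

-- ===== PRECONDITION & SPEC =====
-- Pre_ holds exactly when A returns: some position of the (nonempty) string starts a key,
-- i.e. the string is nonempty and some dict key occurs in it.
def Pre_rech_gauche_droite (l : String) (dic : List (String × Int)) : Prop :=
  l ≠ "" ∧ (PySem.Dict.ofList dic).items.any (fun p => PySem.Str.isIn p.1 l) = true
instance (l : String) (dic : List (String × Int)) : Decidable (Pre_rech_gauche_droite l dic) := by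
  unfold Pre_rech_gauche_droite; infer_instance

def pvWitness_rech_gauche_droite : String × (List (String × Int)) := ("a1c", [("x", 3), ("1", 5)])

def Spec_rech_gauche_droite (l : String) (dic : List (String × Int)) (out : Int) : Prop := out = rech_gauche_droite_alt l dic
instance (l : String) (dic : List (String × Int)) (out : Int) : Decidable (Spec_rech_gauche_droite l dic out) := by unfold Spec_rech_gauche_droite; infer_instance

-- ===== CLAIM (what is proved, stated in full; the proofs are below) =====
def Claim_equal_rech_gauche_droite : Prop := ∀ (l : String) (dic : List (String × Int)), Dom_rech_gauche_droite l dic → Pre_rech_gauche_droite l dic → Spec_rech_gauche_droite l dic (rech_gauche_droite l dic)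

-- ===== LEMMAS AND PROOFS =====

-- the inner loop of A at position j, after bridging to List Char
def pvG (l : String) (dic : List (String × Int)) (j : Nat) : List (Int × String × Int) :=
  ((PySem.Dict.ofList dic).keys.filter
      (fun k => PySem.Chars.startswith (l.toList.drop j) k.toList)).map
    (fun k => ((j : Int), k, (PySem.Dict.ofList dic).getD k 0))

lemma pv_pyGet?_zero {α : Type} (xs : List α) : PySem.List.pyGet? xs 0 = xs.head? := by
  cases xs <;> simp [PySem.List.pyGet?, PySem.List.pyIdx?]

-- A's result, as head of the flatMap of its per-position match lists
lemma pvA_eval (l : String) (dic : List (String × Int)) :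
    rech_gauche_droite l dic =
      (((List.range l.toList.length).flatMap (pvG l dic)).head?.map
        (fun t => t.2.2)).getD 0 := by
  unfold rech_gauche_droite
  rw [PySem.Str.len_eq, PySem.List.pyRange_zero_natCast, List.foldl_map]
  have hcond : ∀ (j : Nat) (k : String),
      PySem.Str.startswith (PySem.Str.slice l (some ((j : Nat) : Int))) k
        = PySem.Chars.startswith (l.toList.drop j) k.toList := by
    intro j k
    rw [PySem.Str.startswith_eq]
    congr 1
    rw [PySem.Str.toList_slice, PySem.Chars.slice_eq_listSlice, PySem.List.slice_from_natCast]
  have hstep : ∀ (res : List (Int × String × Int)) (j : Nat),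
      (PySem.Dict.ofList dic).keys.foldl
        (fun res k =>
          if PySem.Str.startswith (PySem.Str.slice l (some ((j : Nat) : Int))) k then
            res ++ [(((j : Nat) : Int), k, (PySem.Dict.ofList dic).getD k 0)]
          else res) res
      = res ++ pvG l dic j := by
    intro res j
    unfold pvG
    simp only [hcond]
    exact PySem.List.foldl_append_if _ _ _ _
  simp only [hstep]
  rw [PySem.List.foldl_append_eq_flatMap, List.nil_append, pv_pyGet?_zero]
  cases h : ((List.range l.toList.length).flatMap (pvG l dic)).head? with
  | none => rfl
  | some t => rfl

-- B's result, as the first position-minimal eligible item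
lemma pvB_eval (l : String) (dic : List (String × Int)) :
    rech_gauche_droite_alt l dic =
      ((PySem.List.min?
          (((PySem.Dict.ofList dic).items.filter
              (fun p => PySem.Chars.isIn p.1.toList l.toList)).map
            (fun p => (PySem.Chars.find l.toList p.1.toList, p.2)))
          (fun t => t.1)).map (fun t => t.2)).getD 0 := by
  unfold rech_gauche_droite_alt
  simp only [PySem.Str.isIn_eq, PySem.Str.find_eq]
  cases h : PySem.List.min?
      (((PySem.Dict.ofList dic).items.filter
          (fun p => PySem.Chars.isIn p.1.toList l.toList)).map
        (fun p => (PySem.Chars.find l.toList p.1.toList, p.2)))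
      (fun t => t.1) with
  | none => simp
  | some t => simp

-- min?'s fold step, named so the next lemmas can speak about it
def pvStep {α : Type} (key : α → Int) (acc : Option α) (x : α) : Option α :=
  match acc with
  | none => some x
  | some m => if key x < key m then some x else some m

lemma pv_min?_eq_foldl {α : Type} (key : α → Int) (xs : List α) :
    PySem.List.min? xs key = xs.foldl (pvStep key) none := rfl

lemma pv_min?_keep {α : Type} (key : α → Int) (m : α) (t : List α)
    (h : ∀ x ∈ t, ¬ key x < key m) :
    t.foldl (pvStep key) (some m) = some m := by
  induction t with
  | nil => rfl
  | cons y s ih =>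
    have hy : ¬ key y < key m := h y (by simp)
    simp only [List.foldl_cons, pvStep, if_neg hy]
    exact ih (fun x hx => h x (by simp [hx]))

lemma pv_min?_aux {α : Type} (key : α → Int) (m0 : Int) :
    ∀ (t : List α) (a : α), (∀ x ∈ t, m0 ≤ key x) → (∃ x ∈ t, key x = m0) →
      m0 < key a →
      t.foldl (pvStep key) (some a) = (t.filter (fun x => key x == m0)).head? := by
  intro t
  induction t with
  | nil => intro a _ hex _; rcases hex with ⟨x, hx, _⟩; simp at hx
  | cons y s ih =>
    intro a hall hex ha
    by_cases hy : key y = m0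
    · have hlt : key y < key a := by omega
      simp only [List.foldl_cons, pvStep, if_pos hlt, List.filter_cons,
        show (key y == m0) = true from by simpa using hy]
      rw [pv_min?_keep]
      · simp
      · intro x hx
        have := hall x (by simp [hx])
        omega
    · have hy' : m0 < key y := lt_of_le_of_ne (hall y (by simp)) (Ne.symm hy)
      have hex' : ∃ x ∈ s, key x = m0 := by
        rcases hex with ⟨x, hx, hkx⟩
        rcases List.mem_cons.mp hx with h | h
        · exact absurd (h ▸ hkx) hy
        · exact ⟨x, h, hkx⟩
      have hall' : ∀ x ∈ s, m0 ≤ key x := fun x hx => hall x (by simp [hx])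
      simp only [List.foldl_cons, pvStep, List.filter_cons,
        show (key y == m0) = false from by simpa using hy]
      split
      · exact ih y hall' hex' hy'
      · exact ih a hall' hex' ha

lemma pv_min?_eq_head_filter {α : Type} (key : α → Int) (m0 : Int) (xs : List α)
    (hall : ∀ x ∈ xs, m0 ≤ key x) (hex : ∃ x ∈ xs, key x = m0) :
    PySem.List.min? xs key = (xs.filter (fun x => key x == m0)).head? := by
  cases xs with
  | nil => rcases hex with ⟨x, hx, _⟩; simp at hx
  | cons y t =>
    rw [pv_min?_eq_foldl]
    simp only [List.foldl_cons]
    show t.foldl (pvStep key) (pvStep key none y) = _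
    by_cases hy : key y = m0
    · simp only [pvStep, List.filter_cons, show (key y == m0) = true from by simpa using hy]
      rw [pv_min?_keep]
      · simp
      · intro x hx
        have := hall x (by simp [hx])
        omega
    · have hy' : m0 < key y := lt_of_le_of_ne (hall y (by simp)) (Ne.symm hy)
      have hex' : ∃ x ∈ t, key x = m0 := by
        rcases hex with ⟨x, hx, hkx⟩
        rcases List.mem_cons.mp hx with h | h
        · exact absurd (h ▸ hkx) hy
        · exact ⟨x, h, hkx⟩
      simp only [pvStep, List.filter_cons, show (key y == m0) = false from by simpa using hy]
      exact pv_min?_aux key m0 t y (fun x hx => hall x (by simp [hx])) hex' hy'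

lemma pv_head_flatMap {β : Type} (g : Nat → List β) (n i0 : Nat) (hi : i0 < n)
    (hz : ∀ j < i0, g j = []) (hne : g i0 ≠ []) :
    ((List.range n).flatMap g).head? = (g i0).head? := by
  have hsplit : n = (i0 + 1) + (n - (i0 + 1)) := by omega
  rw [hsplit, List.range_add, List.flatMap_append, List.range_succ, List.flatMap_append]
  have h1 : (List.range i0).flatMap g = [] := by
    rw [List.flatMap_eq_nil_iff]
    intro j hj
    exact hz j (List.mem_range.mp hj)
  rw [h1]
  simp only [List.nil_append, List.flatMap_cons, List.flatMap_nil, List.append_nil]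
  cases hg : g i0 with
  | nil => exact absurd hg hne
  | cons x t => simp

-- ===== main equivalence =====
theorem pv_main (l : String) (dic : List (String × Int)) (hpre : Pre_rech_gauche_droite l dic) :
    rech_gauche_droite l dic = rech_gauche_droite_alt l dic := by
  obtain ⟨hl, hex⟩ := hpre
  have hnodup : (PySem.Dict.ofList dic).keys.Nodup :=
    PySem.Dict.nodup_keys_update PySem.Dict.empty dic PySem.Dict.nodup_keys_empty
  have hn : 0 < l.toList.length := by
    have hne : l.toList ≠ [] := fun h0 => hl (String.toList_eq_nil_iff.mp h0)
    exact List.length_pos_of_ne_nil hne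
  -- i0 : the leftmost position where some dict key matches
  have hEx : ∃ i0 : Nat, i0 < l.toList.length ∧
      (∃ k ∈ (PySem.Dict.ofList dic).keys,
        PySem.Chars.startswith (l.toList.drop i0) k.toList = true) ∧
      (∀ t, t < i0 → ¬ ∃ k ∈ (PySem.Dict.ofList dic).keys,
        PySem.Chars.startswith (l.toList.drop t) k.toList = true) := by
    classical
    obtain ⟨p, hpmem, hpin⟩ := List.any_eq_true.mp hex
    have hpin' : PySem.Chars.isIn p.1.toList l.toList = true := by
      rw [PySem.Str.isIn_eq] at hpin; exact hpin
    have hinf : p.1.toList <:+: l.toList := (PySem.Chars.isIn_iff_infix _ _).mp hpin'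
    have hfind0 : 0 ≤ PySem.Chars.find l.toList p.1.toList :=
      (PySem.Chars.find_nonneg_iff _ _).mpr hinf
    have hpref : p.1.toList <+: l.toList.drop (PySem.Chars.find l.toList p.1.toList).toNat :=
      (PySem.Chars.find_spec hfind0).1
    have hjlt : (PySem.Chars.find l.toList p.1.toList).toNat < l.toList.length := by
      by_cases hnil : p.1.toList = []
      · rw [hnil, PySem.Chars.find_nil]
        exact hn
      · have hdropne : l.toList.drop (PySem.Chars.find l.toList p.1.toList).toNat ≠ [] := by
          intro h0
          rw [h0] at hpref
          exact hnil (List.prefix_nil.mp hpref)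
        have h1 : ¬ (l.toList.length ≤ (PySem.Chars.find l.toList p.1.toList).toNat) :=
          fun hle => hdropne (List.drop_eq_nil_iff.mpr hle)
        omega
    have hkmem : p.1 ∈ (PySem.Dict.ofList dic).keys := by
      rw [PySem.Dict.keys.eq_1]; exact List.mem_map_of_mem hpmem
    have hQ : ∃ j : Nat, ∃ k ∈ (PySem.Dict.ofList dic).keys,
        PySem.Chars.startswith (l.toList.drop j) k.toList = true :=
      ⟨_, p.1, hkmem, (PySem.Chars.startswith_iff _ _).mpr hpref⟩
    exact ⟨Nat.find hQ,
      lt_of_le_of_lt (Nat.find_min' hQ ⟨p.1, hkmem, (PySem.Chars.startswith_iff _ _).mpr hpref⟩) hjlt,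
      Nat.find_spec hQ, fun t ht => Nat.find_min hQ ht⟩
  obtain ⟨i0, hi0lt, hP0, hmin⟩ := hEx
  have hnoearly : ∀ (k : String), k ∈ (PySem.Dict.ofList dic).keys →
      ∀ t, t < i0 → ¬ (k.toList <+: l.toList.drop t) := by
    intro k hk t ht hp
    exact hmin t ht ⟨k, hk, (PySem.Chars.startswith_iff _ _).mpr hp⟩
  -- for keys of the dict: matching at i0 ↔ present with find = i0
  have hfind_eq : ∀ (k : String), k ∈ (PySem.Dict.ofList dic).keys →
      (PySem.Chars.startswith (l.toList.drop i0) k.toList = true ↔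
        (PySem.Chars.isIn k.toList l.toList = true ∧
          PySem.Chars.find l.toList k.toList = (i0 : Int))) := by
    intro k hk
    constructor
    · intro hsw
      have hpref' : k.toList <+: l.toList.drop i0 :=
        (PySem.Chars.startswith_iff _ _).mp hsw
      have hinf' : k.toList <:+: l.toList :=
        hpref'.isInfix.trans (List.drop_suffix i0 l.toList).isInfix
      have h0 : 0 ≤ PySem.Chars.find l.toList k.toList :=
        (PySem.Chars.find_nonneg_iff _ _).mpr hinf'
      have hspec := PySem.Chars.find_spec h0
      have hle : (PySem.Chars.find l.toList k.toList).toNat ≤ i0 := by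
        by_contra hgt
        exact (hspec.2 i0 (by omega)) hpref'
      have hge : i0 ≤ (PySem.Chars.find l.toList k.toList).toNat := by
        by_contra hlt
        exact hnoearly k hk _ (by omega) hspec.1
      exact ⟨(PySem.Chars.isIn_iff_infix _ _).mpr hinf', by omega⟩
    · rintro ⟨hin, hfe⟩
      have h0 : 0 ≤ PySem.Chars.find l.toList k.toList := by rw [hfe]; positivity
      have hspec := PySem.Chars.find_spec h0
      have htn : (PySem.Chars.find l.toList k.toList).toNat = i0 := by omega
      rw [htn] at hspec
      exact (PySem.Chars.startswith_iff _ _).mpr hspec.1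
  -- lower bound over the eligible items
  have hall : ∀ pq ∈ (PySem.Dict.ofList dic).items.filter
      (fun p => PySem.Chars.isIn p.1.toList l.toList),
      (i0 : Int) ≤ PySem.Chars.find l.toList pq.1.toList := by
    intro pq hpq
    obtain ⟨hpm, hpi⟩ := List.mem_filter.mp hpq
    have hinf' := (PySem.Chars.isIn_iff_infix _ _).mp hpi
    have h0 := (PySem.Chars.find_nonneg_iff _ _).mpr hinf'
    have hspec := PySem.Chars.find_spec h0
    have hk : pq.1 ∈ (PySem.Dict.ofList dic).keys := by
      rw [PySem.Dict.keys.eq_1]; exact List.mem_map_of_mem hpm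
    have hnl : ¬ (PySem.Chars.find l.toList pq.1.toList).toNat < i0 :=
      fun hlt => hnoearly pq.1 hk _ hlt hspec.1
    omega
  -- the minimum is attained
  have hex2 : ∃ pq ∈ (PySem.Dict.ofList dic).items.filter
      (fun p => PySem.Chars.isIn p.1.toList l.toList),
      PySem.Chars.find l.toList pq.1.toList = (i0 : Int) := by
    obtain ⟨k, hk, hsw⟩ := hP0
    have hk' := hk
    rw [PySem.Dict.keys.eq_1] at hk'
    obtain ⟨q, hqm, hq1⟩ := List.mem_map.mp hk'
    have h := (hfind_eq k hk).mp hsw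
    exact ⟨q, List.mem_filter.mpr ⟨hqm, by rw [hq1]; exact h.1⟩, by rw [hq1]; exact h.2⟩
  -- evaluate both ports
  rw [pvA_eval, pvB_eval]
  -- A: head of the flatMap is the head of the i0 block
  have hGz : ∀ t, t < i0 → pvG l dic t = [] := by
    intro t ht
    unfold pvG
    rw [List.map_eq_nil_iff, List.filter_eq_nil_iff]
    intro k hk hsw
    exact hmin t ht ⟨k, hk, hsw⟩
  obtain ⟨k0, hk0, hsw0⟩ := hP0
  have hGne : pvG l dic i0 ≠ [] := by
    intro h0
    unfold pvG at h0
    rw [List.map_eq_nil_iff, List.filter_eq_nil_iff] at h0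
    exact h0 k0 hk0 hsw0
  rw [pv_head_flatMap (pvG l dic) l.toList.length i0 hi0lt hGz hGne]
  -- A's i0 block, over items
  have hGshape : pvG l dic i0
      = ((PySem.Dict.ofList dic).items.filter
          (fun p => PySem.Chars.startswith (l.toList.drop i0) p.1.toList)).map
        (fun p => ((i0 : Int), p.1, (PySem.Dict.ofList dic).getD p.1 0)) := by
    unfold pvG
    rw [PySem.Dict.keys.eq_1, List.filter_map, List.map_map]
    simp [Function.comp_def]
  rw [hGshape]
  -- B: first minimum = head of the min-position filter
  rw [pv_min?_eq_head_filter (fun t : Int × Int => t.1) ((i0 : Nat) : Int) _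
    (by
      intro x hx
      obtain ⟨q, hq, rfl⟩ := List.mem_map.mp hx
      exact hall q hq)
    (by
      obtain ⟨q, hq, hfe⟩ := hex2
      exact ⟨_, List.mem_map_of_mem hq, hfe⟩)]
  rw [List.filter_map, List.head?_map]
  -- identify the two filters
  have hfilter_eq : ((PySem.Dict.ofList dic).items.filter
        (fun p => PySem.Chars.isIn p.1.toList l.toList)).filter
        ((fun x : Int × Int => x.1 == ((i0 : Nat) : Int)) ∘
          (fun p : String × Int => (PySem.Chars.find l.toList p.1.toList, p.2)))
      = (PySem.Dict.ofList dic).items.filter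
          (fun p => PySem.Chars.startswith (l.toList.drop i0) p.1.toList) := by
    rw [List.filter_filter]
    apply List.filter_congr
    intro q hqm
    have hk : q.1 ∈ (PySem.Dict.ofList dic).keys := by
      rw [PySem.Dict.keys.eq_1]; exact List.mem_map_of_mem hqm
    have hiff := hfind_eq q.1 hk
    simp only [Function.comp_apply]
    by_cases hsw : PySem.Chars.startswith (l.toList.drop i0) q.1.toList = true
    · obtain ⟨hin, hfe⟩ := hiff.mp hsw
      simp [hsw, hin, hfe]
    · simp only [Bool.not_eq_true] at hsw
      rw [hsw]
      by_cases hin : PySem.Chars.isIn q.1.toList l.toList = true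
      · have hne : ¬ PySem.Chars.find l.toList q.1.toList = ((i0 : Nat) : Int) := by
          intro hfe
          have htrue := hiff.mpr ⟨hin, hfe⟩
          rw [htrue] at hsw
          exact Bool.noConfusion hsw
        simp [hin, hne]
      · simp only [Bool.not_eq_true] at hin
        simp [hin]
  rw [hfilter_eq, List.head?_map]
  -- compare the heads
  cases hh : ((PySem.Dict.ofList dic).items.filter
      (fun p => PySem.Chars.startswith (l.toList.drop i0) p.1.toList)).head? with
  | none => simp
  | some q0 =>
    have hq0mem : q0 ∈ (PySem.Dict.ofList dic).items := by
      have hmem := List.mem_of_mem_head? (l := (PySem.Dict.ofList dic).items.filter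
        (fun p => PySem.Chars.startswith (l.toList.drop i0) p.1.toList))
        (a := q0) (by rw [hh]; exact rfl)
      exact (List.mem_filter.mp hmem).1
    have hval : (PySem.Dict.ofList dic).getD q0.1 0 = q0.2 :=
      PySem.Dict.getD_of_mem_items _ hq0mem hnodup 0
    simp [hval]

-- ===== VERDICT (by name: the statement is the Claim_ definition above) =====
theorem rech_gauche_droite_spec : Claim_equal_rech_gauche_droite := by
  intro l dic _ hpre
  unfold Spec_rech_gauche_droite
  exact pv_main l dic hpre
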